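-- pv_equiv track=rewrite | github.com/zivelo1/CopperPilot | workflow/step_1_1_requirements_archiver.py | _classify_circuit_type
-- ===== SOURCE A (Python) =====
-- from typing import Dict, Any, Optional
--
-- def _classify_circuit_type(device_purpose: str,
--                            specifications: Dict[str, Any]) -> str:
--     """
--     Classify circuit type based on purpose and specs
--
--     Returns:
--         str: Circuit classification
--     """
--     purpose_lower = device_purpose.lower()
--
--     # Common circuit type keywords
--     if any(word in purpose_lower for word in ['amplifier', 'amp', 'driver']):
--         return 'amplifier'
--     elif any(word in purpose_lower for word in ['power supply', 'regulator', 'psu']):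
--         return 'power_supply'
--     elif any(word in purpose_lower for word in ['controller', 'microcontroller', 'mcu']):
--         return 'controller'
--     elif any(word in purpose_lower for word in ['sensor', 'detector', 'measurement']):
--         return 'sensor_interface'
--     elif any(word in purpose_lower for word in ['led', 'lighting', 'display']):
--         return 'led_driver'
--     elif any(word in purpose_lower for word in ['motor', 'servo', 'actuator']):
--         return 'motor_control'
--     elif any(word in purpose_lower for word in ['filter', 'processing', 'signal']):
--         return 'signal_processing'
--     elif any(word in purpose_lower for word in ['communication', 'rf', 'transceiver']):
--         return 'communication'
--     else:
--         return 'general_purpose'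
-- ===== SOURCE B (Python) =====
-- # Flat priority map: keyword -> label, in rule-priority order (earlier = higher priority).
-- _KEYWORD_LABELS = [
--     ('amplifier', 'amplifier'), ('amp', 'amplifier'), ('driver', 'amplifier'),
--     ('power supply', 'power_supply'), ('regulator', 'power_supply'), ('psu', 'power_supply'),
--     ('controller', 'controller'), ('microcontroller', 'controller'), ('mcu', 'controller'),
--     ('sensor', 'sensor_interface'), ('detector', 'sensor_interface'), ('measurement', 'sensor_interface'),
--     ('led', 'led_driver'), ('lighting', 'led_driver'), ('display', 'led_driver'),
--     ('motor', 'motor_control'), ('servo', 'motor_control'), ('actuator', 'motor_control'),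
--     ('filter', 'signal_processing'), ('processing', 'signal_processing'), ('signal', 'signal_processing'),
--     ('communication', 'communication'), ('rf', 'communication'), ('transceiver', 'communication'),
-- ]
--
-- def _classify_circuit_type(device_purpose, specifications):
--     # Single reverse-order pass over all keywords with an overwriting accumulator:
--     # every matching keyword overwrites the label, so the last write — the
--     # highest-priority matching keyword — wins. No early exit, no branch cascade.
--     purpose_lower = device_purpose.lower()
--     label = 'general_purpose'
--     for keyword, lab in reversed(_KEYWORD_LABELS):
--         if keyword in purpose_lower:
--             label = lab
--     return label
-- ===== Notes on version B (the rewrite author's own statement) =====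
-- stated objective: alternative
-- what changed: Replaces the first-match if/elif cascade (early return on the first matching group) with a single reverse-order pass over a flat (keyword,label) priority list using an overwriting accumulator, so the last write (the highest-priority matching keyword) wins and every keyword is always tested.
import Mathlib
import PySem

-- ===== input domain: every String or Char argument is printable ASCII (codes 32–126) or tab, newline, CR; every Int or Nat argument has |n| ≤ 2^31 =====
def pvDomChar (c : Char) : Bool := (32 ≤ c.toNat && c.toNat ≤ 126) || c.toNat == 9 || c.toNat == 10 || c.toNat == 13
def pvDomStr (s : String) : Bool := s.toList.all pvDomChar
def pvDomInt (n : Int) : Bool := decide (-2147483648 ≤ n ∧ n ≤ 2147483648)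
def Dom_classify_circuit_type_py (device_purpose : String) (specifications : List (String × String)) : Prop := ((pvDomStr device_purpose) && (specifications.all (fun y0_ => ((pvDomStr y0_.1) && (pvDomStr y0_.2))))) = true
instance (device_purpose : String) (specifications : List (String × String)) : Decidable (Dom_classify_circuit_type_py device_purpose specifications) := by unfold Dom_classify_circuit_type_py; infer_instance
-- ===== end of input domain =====

-- B replaces A's early-return if/elif cascade by one reverse-order overwrite pass over a flat keyword→label priority list (alternative, same cost).

-- ===== PORT A =====
def classify_circuit_type_py (device_purpose : String) (specifications : List (String × String)) : String :=
  let purpose_lower := PySem.Str.lower device_purpose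
  if (["amplifier", "amp", "driver"].any (fun word => PySem.Str.isIn word purpose_lower)) then "amplifier"
  else if (["power supply", "regulator", "psu"].any (fun word => PySem.Str.isIn word purpose_lower)) then "power_supply"
  else if (["controller", "microcontroller", "mcu"].any (fun word => PySem.Str.isIn word purpose_lower)) then "controller"
  else if (["sensor", "detector", "measurement"].any (fun word => PySem.Str.isIn word purpose_lower)) then "sensor_interface"
  else if (["led", "lighting", "display"].any (fun word => PySem.Str.isIn word purpose_lower)) then "led_driver"
  else if (["motor", "servo", "actuator"].any (fun word => PySem.Str.isIn word purpose_lower)) then "motor_control"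
  else if (["filter", "processing", "signal"].any (fun word => PySem.Str.isIn word purpose_lower)) then "signal_processing"
  else if (["communication", "rf", "transceiver"].any (fun word => PySem.Str.isIn word purpose_lower)) then "communication"
  else "general_purpose"

-- ===== PORT B =====
def pvKeywordLabels : List (String × String) :=
  [ ("amplifier", "amplifier"), ("amp", "amplifier"), ("driver", "amplifier"),
    ("power supply", "power_supply"), ("regulator", "power_supply"), ("psu", "power_supply"),
    ("controller", "controller"), ("microcontroller", "controller"), ("mcu", "controller"),
    ("sensor", "sensor_interface"), ("detector", "sensor_interface"), ("measurement", "sensor_interface"),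
    ("led", "led_driver"), ("lighting", "led_driver"), ("display", "led_driver"),
    ("motor", "motor_control"), ("servo", "motor_control"), ("actuator", "motor_control"),
    ("filter", "signal_processing"), ("processing", "signal_processing"), ("signal", "signal_processing"),
    ("communication", "communication"), ("rf", "communication"), ("transceiver", "communication") ]

def classify_circuit_type_py_alt (device_purpose : String) (specifications : List (String × String)) : String :=
  let purpose_lower := PySem.Str.lower device_purpose
  pvKeywordLabels.reverse.foldl
    (fun label kl => if PySem.Str.isIn kl.1 purpose_lower then kl.2 else label)
    "general_purpose"

-- ===== PRECONDITION & SPEC =====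
def Spec_classify_circuit_type_py (device_purpose : String) (specifications : List (String × String)) (out : String) : Prop := out = classify_circuit_type_py_alt device_purpose specifications
instance (device_purpose : String) (specifications : List (String × String)) (out : String) : Decidable (Spec_classify_circuit_type_py device_purpose specifications out) := by unfold Spec_classify_circuit_type_py; infer_instance

-- ===== CLAIM (what is proved, stated in full; the proofs are below) =====
def Claim_equal_classify_circuit_type_py : Prop := ∀ (device_purpose : String) (specifications : List (String × String)), Dom_classify_circuit_type_py device_purpose specifications → Spec_classify_circuit_type_py device_purpose specifications (classify_circuit_type_py device_purpose specifications)

-- ===== LEMMAS AND PROOFS =====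

-- three successive overwrites with the same label collapse to one group test
theorem pv_group3 (b1 b2 b3 : Bool) (l X : String) :
    (if b1 then l else if b2 then l else if b3 then l else X)
      = (if (b1 || b2 || b3) then l else X) := by
  cases b1 <;> cases b2 <;> cases b3 <;> simp

-- ===== VERDICT (by name: the statement is the Claim_ definition above) =====
theorem classify_circuit_type_py_spec : Claim_equal_classify_circuit_type_py := by
  intro dp specs _
  unfold Spec_classify_circuit_type_py classify_circuit_type_py classify_circuit_type_py_alt pvKeywordLabels
  simp only [List.reverse_cons, List.reverse_nil, List.nil_append, List.cons_append,
    List.foldl_cons, List.foldl_nil, List.any_cons, List.any_nil, Bool.or_false]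
  rw [pv_group3, pv_group3, pv_group3, pv_group3, pv_group3, pv_group3, pv_group3, pv_group3]
  simp only [Bool.or_assoc]
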